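-- pv_equiv track=rewrite | github.com/leesok23/Algorithms | 프로그래머스/Lv. 1/3진법 뒤집기.py | solution
-- ===== SOURCE A (Python) =====
-- def solution(n):
--     # 10진법 > 3진법
--     temp = ''
--     while n > 0:
--         temp += str(n % 3)
--         n //= 3
--
--     # return int(temp,3)
--
--     # 3진법 > 10진법
--     answer = 0
--     for i, num in enumerate(temp[::-1]):
--         answer += int(num) * (3**i)
--     return answer
-- ===== SOURCE B (Python) =====
-- def solution(n):
--     answer = 0
--     while n > 0:
--         answer = answer * 3 + n % 3
--         n //= 3
--     return answer
-- ===== Notes on version B (the rewrite author's own statement) =====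
-- stated objective: simpler
-- what changed: Replaces A's two-pass digit-string build plus reversed enumerate with explicit 3**i powers by a single string-free Horner loop folding each extracted base-3 digit directly into the accumulator.
import Mathlib
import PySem

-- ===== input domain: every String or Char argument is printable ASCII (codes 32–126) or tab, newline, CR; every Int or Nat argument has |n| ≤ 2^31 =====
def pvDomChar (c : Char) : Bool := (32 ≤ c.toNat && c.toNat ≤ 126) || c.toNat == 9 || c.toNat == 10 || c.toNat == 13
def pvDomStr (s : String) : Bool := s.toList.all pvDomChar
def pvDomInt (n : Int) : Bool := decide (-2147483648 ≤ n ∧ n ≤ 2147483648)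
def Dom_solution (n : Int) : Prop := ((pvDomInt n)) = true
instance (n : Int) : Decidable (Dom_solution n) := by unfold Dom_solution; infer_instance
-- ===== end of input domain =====

-- B replaces A's digit-string build plus reversed enumerate with 3**i powers by one string-free Horner loop (objective: simpler).

-- ===== PORT A =====
-- while n > 0: temp += str(n % 3); n //= 3   (temp as List Char)
def solutionLoopA (n : Int) (temp : List Char) : List Char :=
  if 0 < n then
    solutionLoopA (PySem.Int.floordiv n 3) (temp ++ PySem.Int.toChars (PySem.Int.mod n 3))
  else temp
termination_by n.toNat
decreasing_by
  rename_i h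
  rw [PySem.Int.floordiv_eq_ediv_of_pos (by omega : (0:Int) < 3)]
  omega

def solution (n : Int) : Int :=
  let temp := solutionLoopA n []
  -- for i, num in enumerate(temp[::-1]): answer += int(num) * (3**i)
  -- int(num) ported as (ofChars? [num]).getD 0: num is always a digit char here, so Python never raises;
  -- the enumerate index i is always ≥ 0, so 3**i is ported with the Nat exponent i.toNat.
  (PySem.List.enumerate temp.reverse).foldl
    (fun answer p => answer + ((PySem.Int.ofChars? [p.2]).getD 0) * (3:Int) ^ p.1.toNat) 0

-- ===== PORT B =====
-- while n > 0: answer = answer * 3 + n % 3; n //= 3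
def solutionAltLoop (n : Int) (answer : Int) : Int :=
  if 0 < n then
    solutionAltLoop (PySem.Int.floordiv n 3) (answer * 3 + PySem.Int.mod n 3)
  else answer
termination_by n.toNat
decreasing_by
  rename_i h
  rw [PySem.Int.floordiv_eq_ediv_of_pos (by omega : (0:Int) < 3)]
  omega

def solution_alt (n : Int) : Int := solutionAltLoop n 0

-- ===== PRECONDITION & SPEC =====
def Spec_solution (n : Int) (out : Int) : Prop := out = solution_alt n
instance (n : Int) (out : Int) : Decidable (Spec_solution n out) := by unfold Spec_solution; infer_instance

-- ===== CLAIM (what is proved, stated in full; the proofs are below) =====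
def Claim_equal_solution : Prop := ∀ (n : Int), Dom_solution n → Spec_solution n (solution n)

-- ===== LEMMAS AND PROOFS =====

-- A's second loop, as a function of the digit list (least-significant digit first in `digits`).
def evalA (L : List Char) : Int :=
  (PySem.List.enumerate L.reverse).foldl
    (fun answer p => answer + ((PySem.Int.ofChars? [p.2]).getD 0) * (3:Int) ^ p.1.toNat) 0

def digitsA (n : Int) : List Char := solutionLoopA n []

lemma loopA_append (n : Int) (temp : List Char) :
    solutionLoopA n temp = temp ++ solutionLoopA n [] := by
  by_cases h : 0 < n
  · conv_lhs => rw [solutionLoopA, if_pos h]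
    conv_rhs => rw [solutionLoopA, if_pos h]
    rw [loopA_append (PySem.Int.floordiv n 3) (temp ++ PySem.Int.toChars (PySem.Int.mod n 3)),
      loopA_append (PySem.Int.floordiv n 3) ([] ++ PySem.Int.toChars (PySem.Int.mod n 3))]
    simp
  · conv_lhs => rw [solutionLoopA, if_neg h]
    conv_rhs => rw [solutionLoopA, if_neg h]
    simp
termination_by n.toNat
decreasing_by
  all_goals
    rw [PySem.Int.floordiv_eq_ediv_of_pos (by omega : (0:Int) < 3)]
    omega

lemma digitsA_pos (n : Int) (h : 0 < n) :
    digitsA n = PySem.Int.toChars (PySem.Int.mod n 3) ++ digitsA (PySem.Int.floordiv n 3) := by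
  unfold digitsA
  rw [solutionLoopA, if_pos h, loopA_append]
  simp

lemma digitsA_nonpos (n : Int) (h : ¬ 0 < n) : digitsA n = [] := by
  unfold digitsA; rw [solutionLoopA, if_neg h]

lemma evalA_cons (c : Char) (L : List Char) :
    evalA (c :: L) = evalA L + ((PySem.Int.ofChars? [c]).getD 0) * (3:Int) ^ L.length := by
  unfold evalA
  rw [List.reverse_cons, PySem.List.enumerate_append, List.foldl_append]
  simp

lemma altLoop_eq (n acc : Int) :
    solutionAltLoop n acc = acc * (3:Int) ^ (digitsA n).length + evalA (digitsA n) := by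
  fun_induction solutionAltLoop n acc with
  | case1 n acc h ih =>
      have h3 : (0:Int) < 3 := by omega
      have hr0 := PySem.Int.mod_nonneg n h3
      have hr3 := PySem.Int.mod_lt n h3
      have hd := digitsA_pos n h
      set r := PySem.Int.mod n 3 with hrdef
      -- r ∈ {0,1,2}: the digit character and its int() value
      have hcase : r = 0 ∨ r = 1 ∨ r = 2 := by omega
      rcases hcase with hr | hr | hr <;>
        · rw [hr] at hd
          rw [ih, hd]
          simp only [show PySem.Int.toChars (0:Int) = ['0'] from by decide,
            show PySem.Int.toChars (1:Int) = ['1'] from by decide,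
            show PySem.Int.toChars (2:Int) = ['2'] from by decide,
            show (PySem.Int.ofChars? ['0']).getD 0 = 0 from by decide,
            show (PySem.Int.ofChars? ['1']).getD 0 = 1 from by decide,
            show (PySem.Int.ofChars? ['2']).getD 0 = 2 from by decide,
            List.singleton_append, evalA_cons, List.length_cons, hr]
          rw [pow_succ]
          ring
  | case2 n acc h =>
      rw [digitsA_nonpos n h]
      simp [evalA]

-- ===== VERDICT (by name: the statement is the Claim_ definition above) =====
theorem solution_spec : Claim_equal_solution := by
  intro n _
  unfold Spec_solution solution solution_alt
  rw [altLoop_eq]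
  simp [evalA, digitsA]
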